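-- pv_equiv track=rewrite | github.com/sid7985/Naxus | nexus-python/network/web_proxy.py | is_domain_allowed
-- ===== SOURCE A (Python) =====
-- from typing import List, Optional
--
-- def is_domain_allowed(target_domain: str, allowed_domains: List[str]) -> bool:
--     """Check if the target domain matches any of the allowed wildcard rules."""
--     target_domain = target_domain.lower()
--     for rule in allowed_domains:
--         rule = rule.lower()
--         if rule.startswith("*."):
--             suffix = rule[2:]
--             if target_domain == suffix or target_domain.endswith("." + suffix):
--                 return True
--         elif target_domain == rule:
--             return True
--     return False
-- ===== SOURCE B (Python) =====
-- def is_domain_allowed(target_domain, allowed_domains):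
--     t = target_domain.lower()
--     rules = {r.lower() for r in allowed_domains}
--     if t in rules or "*." + t in rules:
--         return True
--     for i, ch in enumerate(t):
--         if ch == '.' and "*." + t[i + 1:] in rules:
--             return True
--     return False
-- ===== Notes on version B (the rewrite author's own statement) =====
-- stated objective: alternative
-- what changed: Instead of scanning each rule with per-rule wildcard logic, B builds one set of lowercased rules and probes it with the target's match candidates (the target itself, '*.'+target, and '*.'+tail for every dot-suffix of the target).
import Mathlib
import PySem

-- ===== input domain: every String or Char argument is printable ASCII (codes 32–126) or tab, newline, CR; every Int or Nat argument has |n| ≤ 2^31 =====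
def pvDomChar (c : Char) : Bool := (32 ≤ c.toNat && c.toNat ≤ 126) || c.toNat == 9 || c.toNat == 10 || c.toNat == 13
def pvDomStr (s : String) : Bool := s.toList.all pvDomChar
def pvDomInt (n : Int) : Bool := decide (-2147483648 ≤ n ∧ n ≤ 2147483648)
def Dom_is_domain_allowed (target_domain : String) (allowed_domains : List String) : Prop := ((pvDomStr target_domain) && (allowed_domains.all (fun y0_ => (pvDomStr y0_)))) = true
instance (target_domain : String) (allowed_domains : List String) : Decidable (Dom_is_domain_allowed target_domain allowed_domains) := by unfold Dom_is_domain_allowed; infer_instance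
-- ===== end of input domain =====

-- B replaces the per-rule wildcard scan by one membership set of lowered rules probed with the
-- target's dot-suffix candidates (objective: alternative decomposition; equal asymptotic cost here).

-- ===== PORT A =====
-- the for-loop with early return, on lowered char lists (PySem.Str.* are thin wrappers over PySem.Chars on toList)
def pvAGo (td : List Char) : List String → Bool
  | [] => false
  | r :: rest =>
    let rl := PySem.Chars.lower r.toList
    if PySem.Chars.startswith rl ['*', '.'] then
      let suffix := PySem.List.slice rl (some 2) none
      if td == suffix || PySem.Chars.endswith td ('.' :: suffix) then true else pvAGo td rest
    else if td == rl then true else pvAGo td rest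

def is_domain_allowed (target_domain : String) (allowed_domains : List String) : Bool :=
  let td := PySem.Chars.lower target_domain.toList
  pvAGo td allowed_domains

-- ===== PORT B =====
-- walk the target; at each '.' probe the set with "*." + remaining tail
def pvBGo (s : PySem.Set (List Char)) : List Char → Bool
  | [] => false
  | c :: cs => (c == '.' && s.contains ('*' :: '.' :: cs)) || pvBGo s cs

def is_domain_allowed_alt (target_domain : String) (allowed_domains : List String) : Bool :=
  let td := PySem.Chars.lower target_domain.toList
  let s : PySem.Set (List Char) := PySem.Set.ofList (allowed_domains.map (fun r => PySem.Chars.lower r.toList))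
  if s.contains td || s.contains ('*' :: '.' :: td) then true
  else pvBGo s td

-- ===== PRECONDITION & SPEC =====
def Spec_is_domain_allowed (target_domain : String) (allowed_domains : List String) (out : Bool) : Prop := out = is_domain_allowed_alt target_domain allowed_domains
instance (target_domain : String) (allowed_domains : List String) (out : Bool) : Decidable (Spec_is_domain_allowed target_domain allowed_domains out) := by unfold Spec_is_domain_allowed; infer_instance

-- ===== CLAIM (what is proved, stated in full; the proofs are below) =====
def Claim_equal_is_domain_allowed : Prop := ∀ (target_domain : String) (allowed_domains : List String), Dom_is_domain_allowed target_domain allowed_domains → Spec_is_domain_allowed target_domain allowed_domains (is_domain_allowed target_domain allowed_domains)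

-- ===== LEMMAS AND PROOFS =====

-- A's per-rule test, as one Bool and in Prop form
def pvStep (td rl : List Char) : Bool :=
  if PySem.Chars.startswith rl ['*', '.'] then
    (td == PySem.List.slice rl (some 2) none ||
      PySem.Chars.endswith td ('.' :: PySem.List.slice rl (some 2) none))
  else td == rl

def pvMatches (td rl : List Char) : Prop :=
  rl = td ∨ rl = '*' :: '.' :: td ∨ ∃ cs, rl = '*' :: '.' :: cs ∧ ('.' :: cs) <:+ td

lemma pvAGo_cons (td : List Char) (r : String) (rest : List String) :
    pvAGo td (r :: rest) = (pvStep td (PySem.Chars.lower r.toList) || pvAGo td rest) := by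
  show (if PySem.Chars.startswith (PySem.Chars.lower r.toList) ['*', '.'] then
      if (td == PySem.List.slice (PySem.Chars.lower r.toList) (some 2) none ||
          PySem.Chars.endswith td ('.' :: PySem.List.slice (PySem.Chars.lower r.toList) (some 2) none)) then true
      else pvAGo td rest
    else if td == PySem.Chars.lower r.toList then true else pvAGo td rest) = _
  unfold pvStep
  by_cases hw : PySem.Chars.startswith (PySem.Chars.lower r.toList) ['*', '.'] = true
  · rw [if_pos hw, if_pos hw]
    by_cases h1 : (td == PySem.List.slice (PySem.Chars.lower r.toList) (some 2) none ||
        PySem.Chars.endswith td ('.' :: PySem.List.slice (PySem.Chars.lower r.toList) (some 2) none)) = true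
    · rw [if_pos h1, h1, Bool.true_or]
    · rw [if_neg h1, Bool.not_eq_true] at *
      rw [h1, Bool.false_or]
  · rw [if_neg hw, if_neg hw]
    by_cases h1 : (td == PySem.Chars.lower r.toList) = true
    · rw [if_pos h1, h1, Bool.true_or]
    · rw [if_neg h1, Bool.not_eq_true] at *
      rw [h1, Bool.false_or]

lemma pvAGo_eq_any (td : List Char) (rules : List String) :
    pvAGo td rules = rules.any (fun r => pvStep td (PySem.Chars.lower r.toList)) := by
  induction rules with
  | nil => rfl
  | cons r rest ih => rw [pvAGo_cons, ih, List.any_cons]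

lemma pvStartswith_shape (rl : List Char) (hw : PySem.Chars.startswith rl ['*', '.'] = true) :
    ∃ cs, rl = '*' :: '.' :: cs := by
  cases rl with
  | nil => simp [PySem.Chars.startswith, List.isPrefixOf] at hw
  | cons a t => cases t with
    | nil => simp [PySem.Chars.startswith, List.isPrefixOf] at hw
    | cons b t2 =>
      simp [PySem.Chars.startswith, List.isPrefixOf] at hw
      exact ⟨t2, by simp [← hw.1, ← hw.2]⟩

lemma pvSlice_two (cs : List Char) :
    PySem.List.slice ('*' :: '.' :: cs) (some 2) none = cs := by
  rw [PySem.List.slice_from _ (by norm_num)]; rfl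

lemma pvStep_iff (td rl : List Char) : pvStep td rl = true ↔ pvMatches td rl := by
  unfold pvStep pvMatches
  by_cases hw : PySem.Chars.startswith rl ['*', '.'] = true
  · obtain ⟨cs, rfl⟩ := pvStartswith_shape rl hw
    rw [if_pos hw, pvSlice_two]
    simp only [Bool.or_eq_true, beq_iff_eq, PySem.Chars.endswith, List.isSuffixOf_iff_suffix,
      List.cons.injEq, true_and]
    constructor
    · rintro (rfl | h)
      · exact Or.inr (Or.inl rfl)
      · exact Or.inr (Or.inr ⟨cs, rfl, h⟩)
    · rintro (rfl | rfl | ⟨cs2, rfl, h⟩)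
      · exact Or.inr (List.suffix_cons_iff.mpr (Or.inr (List.suffix_refl _)))
      · exact Or.inl rfl
      · exact Or.inr h
  · rw [if_neg hw]
    simp only [beq_iff_eq]
    constructor
    · rintro rfl; exact Or.inl rfl
    · rintro (rfl | rfl | ⟨cs, rfl, _⟩)
      · rfl
      · exact absurd (by simp [PySem.Chars.startswith, List.isPrefixOf]) hw
      · exact absurd (by simp [PySem.Chars.startswith, List.isPrefixOf]) hw

lemma pvBGo_iff (L : List (List Char)) (td : List Char) :
    pvBGo (PySem.Set.ofList L) td = true ↔ ∃ cs, ('.' :: cs) <:+ td ∧ ('*' :: '.' :: cs) ∈ L := by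
  induction td with
  | nil => simp [pvBGo]
  | cons c cs ih =>
    simp only [pvBGo, Bool.or_eq_true, Bool.and_eq_true, beq_iff_eq, ih,
      PySem.Set.contains, List.contains_iff_mem, PySem.Set.mem_ofList]
    constructor
    · rintro (⟨rfl, hm⟩ | ⟨cs', hsuf, hm⟩)
      · exact ⟨cs, List.suffix_cons_iff.mpr (Or.inl rfl), hm⟩
      · exact ⟨cs', List.suffix_cons_iff.mpr (Or.inr hsuf), hm⟩
    · rintro ⟨cs', hsuf, hm⟩
      rcases List.suffix_cons_iff.mp hsuf with heq | hsuf
      · injection heq with h1 h2; subst h2; exact Or.inl ⟨h1.symm, hm⟩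
      · exact Or.inr ⟨cs', hsuf, hm⟩

lemma pvAlt_iff (td : List Char) (L : List (List Char)) :
    (if (PySem.Set.ofList L).contains td || (PySem.Set.ofList L).contains ('*' :: '.' :: td) then true
     else pvBGo (PySem.Set.ofList L) td) = true ↔ ∃ rl ∈ L, pvMatches td rl := by
  by_cases h : ((PySem.Set.ofList L).contains td || (PySem.Set.ofList L).contains ('*' :: '.' :: td)) = true
  · rw [if_pos h]
    simp only [true_iff]
    rcases Bool.or_eq_true _ _ |>.mp h with h | h
    · exact ⟨td, by simpa [PySem.Set.contains, List.contains_iff_mem, PySem.Set.mem_ofList] using h, Or.inl rfl⟩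
    · exact ⟨_, by simpa [PySem.Set.contains, List.contains_iff_mem, PySem.Set.mem_ofList] using h, Or.inr (Or.inl rfl)⟩
  · rw [if_neg h, pvBGo_iff]
    simp only [Bool.or_eq_true, PySem.Set.contains, List.contains_iff_mem, PySem.Set.mem_ofList, not_or] at h
    constructor
    · rintro ⟨cs, hsuf, hm⟩; exact ⟨_, hm, Or.inr (Or.inr ⟨cs, rfl, hsuf⟩)⟩
    · rintro ⟨rl, hrl, hm⟩
      rcases hm with rfl | rfl | ⟨cs, rfl, hsuf⟩
      · exact absurd hrl h.1
      · exact absurd hrl h.2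
      · exact ⟨cs, hsuf, hrl⟩

-- ===== VERDICT (by name: the statement is the Claim_ definition above) =====
theorem is_domain_allowed_spec : Claim_equal_is_domain_allowed := by
  intro target_domain allowed_domains _
  unfold Spec_is_domain_allowed
  rw [Bool.eq_iff_iff]
  have hA : is_domain_allowed target_domain allowed_domains = true ↔
      ∃ rl ∈ allowed_domains.map (fun r => PySem.Chars.lower r.toList),
        pvMatches (PySem.Chars.lower target_domain.toList) rl := by
    show pvAGo (PySem.Chars.lower target_domain.toList) allowed_domains = true ↔ _
    rw [pvAGo_eq_any, List.any_eq_true]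
    simp only [pvStep_iff, List.mem_map]
    constructor
    · rintro ⟨r, hr, hm⟩; exact ⟨_, ⟨r, hr, rfl⟩, hm⟩
    · rintro ⟨_, ⟨r, hr, rfl⟩, hm⟩; exact ⟨r, hr, hm⟩
  exact hA.trans (pvAlt_iff (PySem.Chars.lower target_domain.toList)
    (allowed_domains.map (fun r => PySem.Chars.lower r.toList))).symm
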